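-- pv_equiv track=rewrite | github.com/galaxyproject/galaxy | lib/galaxy/datatypes/sequence.py | get_split_commands_with_toc
-- ===== SOURCE A (Python) =====
-- from typing import (
--     Any,
--     Callable,
--     Dict,
--     Iterable,
--     List,
--     Optional,
-- )
--
-- def get_split_commands_with_toc(
--     input_name: str, output_name: str, toc_file: Any, start_sequence: int, sequence_count: int
-- ) -> List:
--     """
--     Uses a Table of Contents dict, parsed from an FQTOC file, to come up with a set of
--     shell commands that will extract the parts necessary
--     >>> three_sections=[dict(start=0, end=74, sequences=10), dict(start=74, end=148, sequences=10), dict(start=148, end=148+76, sequences=10)]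
--     >>> Sequence.get_split_commands_with_toc('./input.gz', './output.gz', dict(sections=three_sections), start_sequence=0, sequence_count=10)
--     ['dd bs=1 skip=0 count=74 if=./input.gz 2> /dev/null >> ./output.gz']
--     >>> Sequence.get_split_commands_with_toc('./input.gz', './output.gz', dict(sections=three_sections), start_sequence=1, sequence_count=5)
--     ['(dd bs=1 skip=0 count=74 if=./input.gz 2> /dev/null )| zcat | ( tail -n +5 2> /dev/null) | head -20 | gzip -c >> ./output.gz']
--     >>> Sequence.get_split_commands_with_toc('./input.gz', './output.gz', dict(sections=three_sections), start_sequence=0, sequence_count=20)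
--     ['dd bs=1 skip=0 count=148 if=./input.gz 2> /dev/null >> ./output.gz']
--     >>> Sequence.get_split_commands_with_toc('./input.gz', './output.gz', dict(sections=three_sections), start_sequence=5, sequence_count=10)
--     ['(dd bs=1 skip=0 count=74 if=./input.gz 2> /dev/null )| zcat | ( tail -n +21 2> /dev/null) | head -20 | gzip -c >> ./output.gz', '(dd bs=1 skip=74 count=74 if=./input.gz 2> /dev/null )| zcat | ( tail -n +1 2> /dev/null) | head -20 | gzip -c >> ./output.gz']
--     >>> Sequence.get_split_commands_with_toc('./input.gz', './output.gz', dict(sections=three_sections), start_sequence=10, sequence_count=10)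
--     ['dd bs=1 skip=74 count=74 if=./input.gz 2> /dev/null >> ./output.gz']
--     >>> Sequence.get_split_commands_with_toc('./input.gz', './output.gz', dict(sections=three_sections), start_sequence=5, sequence_count=20)
--     ['(dd bs=1 skip=0 count=74 if=./input.gz 2> /dev/null )| zcat | ( tail -n +21 2> /dev/null) | head -20 | gzip -c >> ./output.gz', 'dd bs=1 skip=74 count=74 if=./input.gz 2> /dev/null >> ./output.gz', '(dd bs=1 skip=148 count=76 if=./input.gz 2> /dev/null )| zcat | ( tail -n +1 2> /dev/null) | head -20 | gzip -c >> ./output.gz']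
--     """
--     sections = toc_file["sections"]
--     result = []
--
--     current_sequence = 0
--     i = 0
--     # skip to the section that contains my starting sequence
--     while i < len(sections) and start_sequence >= current_sequence + int(sections[i]["sequences"]):
--         current_sequence += int(sections[i]["sequences"])
--         i += 1
--     if i == len(sections):  # bad input data!
--         raise Exception(f"No FQTOC section contains starting sequence {start_sequence}")
--
--     # These two variables act as an accumulator for consecutive entire blocks that
--     # can be copied verbatim (without decompressing)
--     start_chunk = -1
--     end_chunk = -1
--     copy_chunk_cmd = "dd bs=1 skip=%s count=%s if=%s 2> /dev/null >> %s"
--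
--     while sequence_count > 0 and i < len(sections):
--         # we need to extract partial data. So, find the byte offsets of the chunks that contain the data we need
--         # use a combination of dd (to pull just the right sections out) tail (to skip lines) and head (to get the
--         # right number of lines
--         sequences = int(sections[i]["sequences"])
--         skip_sequences = start_sequence - current_sequence
--         sequences_to_extract = min(sequence_count, sequences - skip_sequences)
--         start_copy = int(sections[i]["start"])
--         end_copy = int(sections[i]["end"])
--         if sequences_to_extract < sequences:
--             if start_chunk > -1:
--                 result.append(copy_chunk_cmd % (start_chunk, end_chunk - start_chunk, input_name, output_name))
--                 start_chunk = -1
--             # extract, unzip, trim, recompress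
--             result.append(
--                 f"(dd bs=1 skip={start_copy} count={end_copy - start_copy} if={input_name} 2> /dev/null )| zcat | ( tail -n +{skip_sequences * 4 + 1} 2> /dev/null) | head -{sequences_to_extract * 4} | gzip -c >> {output_name}"
--             )
--         else:  # whole section - add it to the start_chunk/end_chunk accumulator
--             if start_chunk == -1:
--                 start_chunk = start_copy
--             end_chunk = end_copy
--         sequence_count -= sequences_to_extract
--         start_sequence += sequences_to_extract
--         current_sequence += sequences
--         i += 1
--     if start_chunk > -1:
--         result.append(copy_chunk_cmd % (start_chunk, end_chunk - start_chunk, input_name, output_name))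
--
--     if sequence_count > 0:
--         raise Exception(f"{sequence_count} sequences not found in file")
--
--     return result
-- ===== SOURCE B (Python) =====
-- def get_split_commands_with_toc(
--     input_name, output_name, toc_file, start_sequence, sequence_count
-- ):
--     sections = toc_file["sections"]
--
--     # locate the section containing the starting sequence (same exception as A)
--     current_sequence = 0
--     i = 0
--     while i < len(sections) and start_sequence >= current_sequence + int(sections[i]["sequences"]):
--         current_sequence += int(sections[i]["sequences"])
--         i += 1
--     if i == len(sections):
--         raise Exception(f"No FQTOC section contains starting sequence {start_sequence}")
--
--     # pass 1: build a plan of records, tagging each overlapping section either as a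
--     # whole-section raw byte range or as a partial extract with its parameters
--     plan = []
--     while sequence_count > 0 and i < len(sections):
--         sequences = int(sections[i]["sequences"])
--         skip_sequences = start_sequence - current_sequence
--         sequences_to_extract = min(sequence_count, sequences - skip_sequences)
--         start_copy = int(sections[i]["start"])
--         end_copy = int(sections[i]["end"])
--         if sequences_to_extract < sequences:
--             plan.append(("extract", start_copy, end_copy, skip_sequences, sequences_to_extract))
--         else:
--             plan.append(("raw", start_copy, end_copy, 0, 0))
--         sequence_count -= sequences_to_extract
--         start_sequence += sequences_to_extract
--         current_sequence += sequences
--         i += 1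
--
--     # pass 2: emit commands, coalescing runs of consecutive raw records into one dd
--     result = []
--     run = None  # (start, end) byte range of the current raw run
--     for kind, start_copy, end_copy, skip_sequences, sequences_to_extract in plan:
--         if kind == "raw":
--             run = (run[0], end_copy) if run is not None else (start_copy, end_copy)
--         else:
--             if run is not None:
--                 result.append("dd bs=1 skip=%s count=%s if=%s 2> /dev/null >> %s" % (run[0], run[1] - run[0], input_name, output_name))
--                 run = None
--             result.append(
--                 f"(dd bs=1 skip={start_copy} count={end_copy - start_copy} if={input_name} 2> /dev/null )| zcat | ( tail -n +{skip_sequences * 4 + 1} 2> /dev/null) | head -{sequences_to_extract * 4} | gzip -c >> {output_name}"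
--             )
--     if run is not None:
--         result.append("dd bs=1 skip=%s count=%s if=%s 2> /dev/null >> %s" % (run[0], run[1] - run[0], input_name, output_name))
--
--     if sequence_count > 0:
--         raise Exception(f"{sequence_count} sequences not found in file")
--     return result
-- ===== Notes on version B (the rewrite author's own statement) =====
-- stated objective: alternative
-- what changed: A interleaves command emission with the section scan using a -1 sentinel accumulator for raw byte runs; B first builds a plan list of tagged records (raw range vs extract parameters) in one pass and then a second pass emits commands, coalescing consecutive raw records with an Option run state.
import Mathlib
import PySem

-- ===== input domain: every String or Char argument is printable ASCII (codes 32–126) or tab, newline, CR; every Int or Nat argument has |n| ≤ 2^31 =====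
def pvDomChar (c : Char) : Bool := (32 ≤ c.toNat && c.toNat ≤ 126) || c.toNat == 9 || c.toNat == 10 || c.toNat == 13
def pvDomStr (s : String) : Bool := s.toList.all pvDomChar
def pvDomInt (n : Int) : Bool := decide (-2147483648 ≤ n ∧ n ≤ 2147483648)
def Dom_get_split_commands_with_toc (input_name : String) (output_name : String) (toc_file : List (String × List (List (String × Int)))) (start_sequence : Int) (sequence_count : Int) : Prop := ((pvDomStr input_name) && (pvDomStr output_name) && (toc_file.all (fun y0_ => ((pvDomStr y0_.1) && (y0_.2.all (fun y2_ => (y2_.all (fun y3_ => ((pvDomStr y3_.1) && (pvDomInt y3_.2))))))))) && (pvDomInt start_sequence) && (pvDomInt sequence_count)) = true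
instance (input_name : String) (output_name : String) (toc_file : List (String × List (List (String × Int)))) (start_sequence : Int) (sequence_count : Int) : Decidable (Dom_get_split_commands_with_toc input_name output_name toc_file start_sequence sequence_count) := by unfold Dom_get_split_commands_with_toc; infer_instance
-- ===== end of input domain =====

-- B replaces A's interleaved emission with -1 sentinel accumulator by a plan-then-emit
-- two-pass decomposition (objective: alternative; return values proved equal on Pre_).

-- shared helpers (both Pythons use the same dict lookups and format strings)
-- Python dict lookup on an association list: first match (exact; none = KeyError)
def pvLookup {α : Type} (d : List (String × α)) (k : String) : Option α :=
  match d with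
  | [] => none
  | (k', v) :: rest => if k' = k then some v else pvLookup rest k

def pvSeqOf (sec : List (String × Int)) : Int := (pvLookup sec "sequences").getD 0
def pvStartOf (sec : List (String × Int)) : Int := (pvLookup sec "start").getD 0
def pvEndOf (sec : List (String × Int)) : Int := (pvLookup sec "end").getD 0

-- "dd bs=1 skip=%s count=%s if=%s 2> /dev/null >> %s" % (a, c, input_name, output_name)
def pvCopyCmd (input_name output_name : String) (a c : Int) : String :=
  "dd bs=1 skip=" ++ PySem.Int.toStr a ++ " count=" ++ PySem.Int.toStr c ++ " if=" ++ input_name ++ " 2> /dev/null >> " ++ output_name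

-- the extract f-string, with the same arithmetic inside
def pvExtractCmd (input_name output_name : String) (s e skip take : Int) : String :=
  "(dd bs=1 skip=" ++ PySem.Int.toStr s ++ " count=" ++ PySem.Int.toStr (e - s) ++ " if=" ++ input_name ++
  " 2> /dev/null )| zcat | ( tail -n +" ++ PySem.Int.toStr (skip * 4 + 1) ++ " 2> /dev/null) | head -" ++
  PySem.Int.toStr (take * 4) ++ " | gzip -c >> " ++ output_name

-- the skip-to-starting-section loop (identical in A and B): returns the remaining
-- section suffix and current_sequence; none = A's "No FQTOC section" exception
def pvSkip (secs : List (List (String × Int))) (start_sequence current_sequence : Int) :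
    Option (List (List (String × Int)) × Int) :=
  match secs with
  | [] => none
  | sec :: rest =>
    if start_sequence ≥ current_sequence + pvSeqOf sec then
      pvSkip rest start_sequence (current_sequence + pvSeqOf sec)
    else
      some (sec :: rest, current_sequence)

-- ===== PORT A =====
-- A's main while loop: state = (start_sequence, sequence_count, current_sequence,
-- start_chunk, end_chunk, result); flush of the -1 sentinel accumulator at loop end
def pvALoop (input_name output_name : String) (secs : List (List (String × Int)))
    (start_sequence sequence_count current_sequence start_chunk end_chunk : Int)
    (result : List String) : List String :=
  match secs with
  | [] =>
    if start_chunk > -1 then result ++ [pvCopyCmd input_name output_name start_chunk (end_chunk - start_chunk)]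
    else result
  | sec :: rest =>
    if sequence_count > 0 then
      let sequences := pvSeqOf sec
      let skip_sequences := start_sequence - current_sequence
      let sequences_to_extract := min sequence_count (sequences - skip_sequences)
      let start_copy := pvStartOf sec
      let end_copy := pvEndOf sec
      if sequences_to_extract < sequences then
        let result1 := if start_chunk > -1 then result ++ [pvCopyCmd input_name output_name start_chunk (end_chunk - start_chunk)] else result
        pvALoop input_name output_name rest (start_sequence + sequences_to_extract)
          (sequence_count - sequences_to_extract) (current_sequence + sequences) (-1) end_chunk
          (result1 ++ [pvExtractCmd input_name output_name start_copy end_copy skip_sequences sequences_to_extract])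
      else
        pvALoop input_name output_name rest (start_sequence + sequences_to_extract)
          (sequence_count - sequences_to_extract) (current_sequence + sequences)
          (if start_chunk = -1 then start_copy else start_chunk) end_copy result
    else
      if start_chunk > -1 then result ++ [pvCopyCmd input_name output_name start_chunk (end_chunk - start_chunk)]
      else result

def get_split_commands_with_toc (input_name : String) (output_name : String) (toc_file : List (String × List (List (String × Int)))) (start_sequence : Int) (sequence_count : Int) : List String :=
  match pvLookup toc_file "sections" with
  | none => []  -- KeyError; excluded by Pre_
  | some sections =>
    match pvSkip sections start_sequence 0 with
    | none => []  -- "No FQTOC section contains starting sequence"; excluded by Pre_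
    | some (rest, current_sequence) =>
      -- the trailing "sequences not found" raise is excluded by Pre_
      pvALoop input_name output_name rest start_sequence sequence_count current_sequence (-1) (-1) []

-- ===== PORT B =====
-- pass 1: one plan record per overlapping section
inductive PvPlanRec : Type
  | raw (start_copy end_copy : Int)
  | ext (start_copy end_copy skip_sequences sequences_to_extract : Int)
deriving DecidableEq, Repr

def pvBPlan (secs : List (List (String × Int)))
    (start_sequence sequence_count current_sequence : Int) : List PvPlanRec :=
  match secs with
  | [] => []
  | sec :: rest =>
    if sequence_count > 0 then
      let sequences := pvSeqOf sec
      let skip_sequences := start_sequence - current_sequence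
      let sequences_to_extract := min sequence_count (sequences - skip_sequences)
      let start_copy := pvStartOf sec
      let end_copy := pvEndOf sec
      (if sequences_to_extract < sequences then
        PvPlanRec.ext start_copy end_copy skip_sequences sequences_to_extract
       else
        PvPlanRec.raw start_copy end_copy) ::
      pvBPlan rest (start_sequence + sequences_to_extract)
        (sequence_count - sequences_to_extract) (current_sequence + sequences)
    else []

-- pass 2: emit, coalescing consecutive raw records; run : Option (start, end)
def pvBEmit (input_name output_name : String) (plan : List PvPlanRec)
    (run : Option (Int × Int)) : List String :=
  match plan with
  | [] =>
    match run with
    | some (a, b) => [pvCopyCmd input_name output_name a (b - a)]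
    | none => []
  | PvPlanRec.raw s e :: rest =>
    pvBEmit input_name output_name rest
      (some (match run with | some (a, _) => (a, e) | none => (s, e)))
  | PvPlanRec.ext s e skip take :: rest =>
    (match run with
     | some (a, b) => [pvCopyCmd input_name output_name a (b - a)]
     | none => []) ++
    pvExtractCmd input_name output_name s e skip take ::
    pvBEmit input_name output_name rest none

def get_split_commands_with_toc_alt (input_name : String) (output_name : String) (toc_file : List (String × List (List (String × Int)))) (start_sequence : Int) (sequence_count : Int) : List String :=
  match pvLookup toc_file "sections" with
  | none => []
  | some sections =>
    match pvSkip sections start_sequence 0 with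
    | none => []
    | some (rest, current_sequence) =>
      pvBEmit input_name output_name
        (pvBPlan rest start_sequence sequence_count current_sequence) none

-- ===== PRECONDITION & SPEC =====
-- Pre_ restricts to the natural domain of the function — well-formed TOCs (a "sections"
-- key; every section carries "start"/"end"/"sequences" with sequences ≥ 0 and a
-- nonnegative start byte offset) and requests the TOC can satisfy (start_sequence before
-- the total sequence count, and the requested range inside it, else A raises); this
-- excludes some malformed TOCs on which A still happens to return (see cites).
-- first-match association lookup, stated with the library's List.find? (no recursion of our own)
def pvGetKey {α : Type} (d : List (String × α)) (k : String) : Option α :=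
  (d.find? (fun p => p.1 == k)).map Prod.snd

def Pre_get_split_commands_with_toc (input_name : String) (output_name : String) (toc_file : List (String × List (List (String × Int)))) (start_sequence : Int) (sequence_count : Int) : Prop :=
  (pvGetKey toc_file "sections").isSome ∧
  (let sections := (pvGetKey toc_file "sections").getD []
   sections ≠ [] ∧
   (∀ sec ∈ sections,
     (pvGetKey sec "sequences").isSome ∧ (pvGetKey sec "start").isSome ∧
     (pvGetKey sec "end").isSome ∧ 0 ≤ (pvGetKey sec "sequences").getD 0 ∧
     0 ≤ (pvGetKey sec "start").getD 0) ∧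
   start_sequence < (sections.map (fun sec => (pvGetKey sec "sequences").getD 0)).sum ∧
   (sequence_count ≤ 0 ∨
    start_sequence + sequence_count ≤ (sections.map (fun sec => (pvGetKey sec "sequences").getD 0)).sum))

instance (input_name : String) (output_name : String) (toc_file : List (String × List (List (String × Int)))) (start_sequence : Int) (sequence_count : Int) : Decidable (Pre_get_split_commands_with_toc input_name output_name toc_file start_sequence sequence_count) := by unfold Pre_get_split_commands_with_toc; infer_instance

def pvWitness_get_split_commands_with_toc : String × String × (List (String × List (List (String × Int)))) × Int × Int :=
  ("./input.gz", "./output.gz",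
   [("sections", [[("start", 0), ("end", 74), ("sequences", 10)],
                  [("start", 74), ("end", 148), ("sequences", 10)]])], 5, 10)

def Spec_get_split_commands_with_toc (input_name : String) (output_name : String) (toc_file : List (String × List (List (String × Int)))) (start_sequence : Int) (sequence_count : Int) (out : List String) : Prop := out = get_split_commands_with_toc_alt input_name output_name toc_file start_sequence sequence_count
instance (input_name : String) (output_name : String) (toc_file : List (String × List (List (String × Int)))) (start_sequence : Int) (sequence_count : Int) (out : List String) : Decidable (Spec_get_split_commands_with_toc input_name output_name toc_file start_sequence sequence_count out) := by unfold Spec_get_split_commands_with_toc; infer_instance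

-- ===== CLAIM (what is proved, stated in full; the proofs are below) =====
def Claim_equal_get_split_commands_with_toc : Prop := ∀ (input_name : String) (output_name : String) (toc_file : List (String × List (List (String × Int)))) (start_sequence : Int) (sequence_count : Int), Dom_get_split_commands_with_toc input_name output_name toc_file start_sequence sequence_count → Pre_get_split_commands_with_toc input_name output_name toc_file start_sequence sequence_count → Spec_get_split_commands_with_toc input_name output_name toc_file start_sequence sequence_count (get_split_commands_with_toc input_name output_name toc_file start_sequence sequence_count)

-- ===== LEMMAS AND PROOFS =====

-- sum of the sections' "sequences" fields
def pvSumSeq (secs : List (List (String × Int))) : Int := (secs.map pvSeqOf).sum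


theorem pvGetKey_eq {α : Type} (d : List (String × α)) (k : String) : pvGetKey d k = pvLookup d k := by
  induction d with
  | nil => rfl
  | cons p rest ih =>
    obtain ⟨k', v⟩ := p
    simp only [pvGetKey, pvLookup, List.find?] at ih ⊢
    by_cases h : k' = k
    · have hb : (k' == k) = true := by simp [h]
      simp [hb, h]
    · have hb : (k' == k) = false := by simp [h]
      simp [hb, h, ih]

-- the run state tracked by B's emitter corresponds to A's sentinel pair
def pvRunRel (start_chunk end_chunk : Int) (run : Option (Int × Int)) : Prop :=
  (start_chunk = -1 ∧ run = none) ∨ (start_chunk > -1 ∧ run = some (start_chunk, end_chunk))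

theorem pvLoop_eq (input_name output_name : String) (secs : List (List (String × Int)))
    (hstart : ∀ sec ∈ secs, 0 ≤ pvStartOf sec) :
    ∀ (start_sequence sequence_count current_sequence start_chunk end_chunk : Int)
      (result : List String) (run : Option (Int × Int)),
      pvRunRel start_chunk end_chunk run →
      pvALoop input_name output_name secs start_sequence sequence_count current_sequence
        start_chunk end_chunk result
      = result ++ pvBEmit input_name output_name
          (pvBPlan secs start_sequence sequence_count current_sequence) run := by
  induction secs with
  | nil =>
    intro s c cur sc ec res run hrel
    simp only [pvALoop, pvBPlan, pvBEmit]
    rcases hrel with ⟨h1, h2⟩ | ⟨h1, h2⟩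
    · subst h2; simp [h1]
    · subst h2; rw [if_pos h1]
  | cons sec rest ih =>
    intro s c cur sc ec res run hrel
    have hsec : 0 ≤ pvStartOf sec := hstart sec (List.mem_cons_self ..)
    have hrest : ∀ x ∈ rest, 0 ≤ pvStartOf x := fun x hx => hstart x (List.mem_cons_of_mem _ hx)
    by_cases hc : c > 0
    · simp only [pvALoop, pvBPlan, if_pos hc]
      by_cases hpart : min c (pvSeqOf sec - (s - cur)) < pvSeqOf sec
      · rw [if_pos hpart, if_pos hpart]
        simp only [pvBEmit]
        rw [ih hrest _ _ _ _ _ _ none (Or.inl ⟨rfl, rfl⟩)]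
        rcases hrel with ⟨h1, h2⟩ | ⟨h1, h2⟩
        · subst h2; rw [if_neg (by omega)]; simp
        · subst h2; rw [if_pos h1]; simp
      · rw [if_neg hpart, if_neg hpart]
        simp only [pvBEmit]
        rcases hrel with ⟨h1, h2⟩ | ⟨h1, h2⟩
        · subst h2
          rw [if_pos h1]
          exact ih hrest _ _ _ _ _ _ _ (Or.inr ⟨by omega, rfl⟩)
        · subst h2
          rw [if_neg (by omega)]
          exact ih hrest _ _ _ _ _ _ _ (Or.inr ⟨h1, rfl⟩)
    · simp only [pvALoop, pvBPlan, if_neg hc, pvBEmit]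
      rcases hrel with ⟨h1, h2⟩ | ⟨h1, h2⟩
      · subst h2; simp [h1]
      · subst h2; rw [if_pos h1]

theorem pvSkip_isSome (start_sequence : Int) :
    ∀ (secs : List (List (String × Int))) (cur : Int), secs ≠ [] →
      start_sequence < cur + pvSumSeq secs → (pvSkip secs start_sequence cur).isSome := by
  intro secs
  induction secs with
  | nil => intro cur h _; exact absurd rfl h
  | cons sec rest ih =>
    intro cur _ hlt
    simp only [pvSkip]
    by_cases h : start_sequence ≥ cur + pvSeqOf sec
    · rw [if_pos h]
      rcases rest with _ | ⟨r, rs⟩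
      · exfalso; simp [pvSumSeq] at hlt; omega
      · exact ih _ (by simp) (by simp [pvSumSeq] at hlt ⊢; omega)
    · rw [if_neg h]; rfl

theorem pvSkip_mem (start_sequence : Int) :
    ∀ (secs : List (List (String × Int))) (cur : Int) (rest : List (List (String × Int))) (c : Int),
      pvSkip secs start_sequence cur = some (rest, c) → ∀ x ∈ rest, x ∈ secs := by
  intro secs
  induction secs with
  | nil => intro cur rest c h; simp [pvSkip] at h
  | cons sec tl ih =>
    intro cur rest c h x hx
    simp only [pvSkip] at h
    by_cases hge : start_sequence ≥ cur + pvSeqOf sec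
    · rw [if_pos hge] at h
      exact List.mem_cons_of_mem _ (ih _ _ _ h x hx)
    · rw [if_neg hge] at h
      simp only [Option.some.injEq, Prod.mk.injEq] at h
      obtain ⟨h1, _⟩ := h
      subst h1
      exact hx

-- ===== VERDICT (by name: the statement is the Claim_ definition above) =====
theorem get_split_commands_with_toc_spec : Claim_equal_get_split_commands_with_toc := by
  intro input_name output_name toc_file start_sequence sequence_count _ hpre
  unfold Spec_get_split_commands_with_toc
  unfold Pre_get_split_commands_with_toc at hpre
  simp only [pvGetKey_eq] at hpre
  obtain ⟨hs, hrest⟩ := hpre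
  unfold get_split_commands_with_toc get_split_commands_with_toc_alt
  cases hlk : pvLookup toc_file "sections" with
  | none => rfl
  | some sections =>
    rw [hlk, Option.getD_some] at hrest
    obtain ⟨hne, hwf, hlt0, _⟩ := hrest
    have hlt : start_sequence < pvSumSeq sections := hlt0
    have hsome := pvSkip_isSome start_sequence sections 0 hne (by omega)
    cases hsk : pvSkip sections start_sequence 0 with
    | none => rw [hsk] at hsome; simp at hsome
    | some p =>
      obtain ⟨rest, cur⟩ := p
      have hmem : ∀ x ∈ rest, 0 ≤ pvStartOf x := fun x hx =>
        (hwf x (pvSkip_mem start_sequence sections 0 rest cur hsk x hx)).2.2.2.2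
      simp only [hsk]
      rw [pvLoop_eq input_name output_name rest hmem start_sequence sequence_count cur
        (-1) (-1) [] none (Or.inl ⟨rfl, rfl⟩)]
      simp
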